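-- pv_equiv track=rewrite | github.com/Raiff1982/TheAi | codette_new.py | _generate_followup_suggestions
-- ===== SOURCE A (Python) =====
-- from typing import List, Dict, Any, Optional
--
-- def _generate_followup_suggestions(prompt: str, concepts: List[str], is_daw_query: bool) -> Optional[str]:
--     """Proactively offer follow-up topics based on the prompt content."""
--     prompt_lower = prompt.lower()
--     suggestions: List[str] = []
--
--     if is_daw_query:
--         if any(term in prompt_lower for term in ['vocal', 'singer', 'voice']):
--             suggestions.extend([
--                 "Ask for a vocal chain order (HPF → EQ → compression → de-ess → reverb send).",
--                 "Check de-esser thresholds or sibilant bands if highs feel harsh.",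
--                 "Request suggested attack/release times for your vocal style (spoken vs sung).",
--             ])
--         elif any(term in prompt_lower for term in ['guitar', 'bass', 'drum', 'kick', 'snare']):
--             suggestions.extend([
--                 "Compare mic/DI blend tips for your instrument to tighten tone.",
--                 "Ask for frequency slots to avoid masking with vocals or synths.",
--                 "Request parallel processing ideas (parallel comp or saturation) for punch without losing transients.",
--             ])
--         elif any(term in prompt_lower for term in ['reverb', 'delay', 'space', 'ambience']):
--             suggestions.extend([
--                 "Ask for predelay/decay starting points matched to your BPM.",
--                 "Check which elements should stay dry vs sent to the shared verb bus.",
--                 "Try mid-side EQ on reverb returns to keep lows centered and highs airy.",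
--             ])
--         elif any(term in prompt_lower for term in ['mix', 'master', 'muddy', 'harsh', 'boomy', 'mud']):
--             suggestions.extend([
--                 "Request a 3-step cleanup checklist (HPF targets, surgical EQ, gain staging).",
--                 "Ask for reference track matching tips (loudness and tonal balance).",
--                 "Check mono-compatibility and phase if the mix collapses when summed.",
--             ])
--         else:
--             target = concepts[0] if concepts else 'your track'
--             suggestions.extend([
--                 f"Ask for a quick signal-flow plan tailored to {target} (gain → EQ → compression → space).",
--                 "Request starter EQ bands and ratios for common sources (vocals, drums, bass).",
--                 "Ask for a minimal CPU chain if your session is lagging (shared sends, render heavy FX).",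
--             ])
--     else:
--         if any(term in prompt_lower for term in ['plan', 'next', 'follow', 'what else']):
--             suggestions.extend([
--                 "Define the goal, constraints, and success criteria so I can propose a concise plan.",
--                 "Ask for a decision tree to pick the next action based on your context.",
--                 "Request a short checklist you can execute immediately.",
--             ])
--         elif any(term in prompt_lower for term in ['help', 'stuck', 'problem', 'issue']):
--             suggestions.extend([
--                 "Share the exact symptom and recent changes so I can triage quickly.",
--                 "Ask for the top three likely causes and how to rule each out fast.",
--                 "Request a minimal reproduction checklist to isolate the issue.",
--             ])
--         else:
--             focus = concepts[0] if concepts else 'this topic'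
--             suggestions.extend([
--                 f"Ask for a 3-bullet summary of {focus}, then a deeper dive only where you need it.",
--                 "Request examples vs counter-examples to clarify the boundaries of the idea.",
--                 "Ask for a quick-start checklist you can try in under 5 minutes.",
--             ])
--
--     if not suggestions:
--         return None
--
--     # Keep it concise and deterministic: top 3 suggestions only.
--     trimmed = suggestions[:3]
--     return "Follow-up ideas:\n- " + "\n- ".join(trimmed)
-- ===== SOURCE B (Python) =====
-- from typing import List, Optional
--
-- # Flat keyword index: each keyword maps to a priority number (lower = higher priority).
-- _DAW_KEYWORDS = [
--     ('vocal', 0), ('singer', 0), ('voice', 0),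
--     ('guitar', 1), ('bass', 1), ('drum', 1), ('kick', 1), ('snare', 1),
--     ('reverb', 2), ('delay', 2), ('space', 2), ('ambience', 2),
--     ('mix', 3), ('master', 3), ('muddy', 3), ('harsh', 3), ('boomy', 3), ('mud', 3),
-- ]
-- _GENERAL_KEYWORDS = [
--     ('plan', 0), ('next', 0), ('follow', 0), ('what else', 0),
--     ('help', 1), ('stuck', 1), ('problem', 1), ('issue', 1),
-- ]
-- _DAW_TEXTS = [
--     ["Ask for a vocal chain order (HPF → EQ → compression → de-ess → reverb send).",
--      "Check de-esser thresholds or sibilant bands if highs feel harsh.",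
--      "Request suggested attack/release times for your vocal style (spoken vs sung)."],
--     ["Compare mic/DI blend tips for your instrument to tighten tone.",
--      "Ask for frequency slots to avoid masking with vocals or synths.",
--      "Request parallel processing ideas (parallel comp or saturation) for punch without losing transients."],
--     ["Ask for predelay/decay starting points matched to your BPM.",
--      "Check which elements should stay dry vs sent to the shared verb bus.",
--      "Try mid-side EQ on reverb returns to keep lows centered and highs airy."],
--     ["Request a 3-step cleanup checklist (HPF targets, surgical EQ, gain staging).",
--      "Ask for reference track matching tips (loudness and tonal balance).",
--      "Check mono-compatibility and phase if the mix collapses when summed."],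
-- ]
-- _GENERAL_TEXTS = [
--     ["Define the goal, constraints, and success criteria so I can propose a concise plan.",
--      "Ask for a decision tree to pick the next action based on your context.",
--      "Request a short checklist you can execute immediately."],
--     ["Share the exact symptom and recent changes so I can triage quickly.",
--      "Ask for the top three likely causes and how to rule each out fast.",
--      "Request a minimal reproduction checklist to isolate the issue."],
-- ]
--
--
-- def _generate_followup_suggestions(prompt: str, concepts: List[str], is_daw_query: bool) -> Optional[str]:
--     prompt_lower = prompt.lower()
--     keywords, texts = (_DAW_KEYWORDS, _DAW_TEXTS) if is_daw_query else (_GENERAL_KEYWORDS, _GENERAL_TEXTS)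
--     # Collect the priorities of ALL keywords present, then keep the best (lowest) one.
--     hits = [prio for term, prio in keywords if term in prompt_lower]
--     if hits:
--         lines = texts[min(hits)]
--     elif is_daw_query:
--         target = concepts[0] if concepts else 'your track'
--         lines = [
--             f"Ask for a quick signal-flow plan tailored to {target} (gain → EQ → compression → space).",
--             "Request starter EQ bands and ratios for common sources (vocals, drums, bass).",
--             "Ask for a minimal CPU chain if your session is lagging (shared sends, render heavy FX).",
--         ]
--     else:
--         focus = concepts[0] if concepts else 'this topic'
--         lines = [
--             f"Ask for a 3-bullet summary of {focus}, then a deeper dive only where you need it.",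
--             "Request examples vs counter-examples to clarify the boundaries of the idea.",
--             "Ask for a quick-start checklist you can try in under 5 minutes.",
--         ]
--     return "Follow-up ideas:\n- " + "\n- ".join(lines[:3])
-- ===== Notes on version B (the rewrite author's own statement) =====
-- stated objective: alternative
-- what changed: Replaces A's two if/elif branch chains (each testing any(term in prompt) per branch) with a flat keyword-to-priority index: one comprehension collects the priorities of ALL matching keywords and min() selects the winning topic, with the branch-appropriate fallback when nothing matches.
import Mathlib
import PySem

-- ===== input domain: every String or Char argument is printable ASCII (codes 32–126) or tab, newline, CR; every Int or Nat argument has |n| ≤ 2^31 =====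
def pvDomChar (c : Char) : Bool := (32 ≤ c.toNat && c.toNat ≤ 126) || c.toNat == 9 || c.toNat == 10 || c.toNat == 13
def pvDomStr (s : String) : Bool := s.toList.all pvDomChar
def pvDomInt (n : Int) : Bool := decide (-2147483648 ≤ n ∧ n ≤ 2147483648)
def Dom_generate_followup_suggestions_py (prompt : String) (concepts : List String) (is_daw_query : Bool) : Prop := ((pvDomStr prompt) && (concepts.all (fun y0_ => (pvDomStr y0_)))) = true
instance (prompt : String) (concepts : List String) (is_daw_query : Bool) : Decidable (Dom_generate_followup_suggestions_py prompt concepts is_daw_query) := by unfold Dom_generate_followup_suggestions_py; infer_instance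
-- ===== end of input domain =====

-- B replaces A's two if/elif branch chains by a flat prioritised keyword index: one comprehension collects the priorities of ALL matching keywords, min() picks the best; objective: alternative, same return value everywhere.

-- ===== PORT A =====
-- Port of A: if/elif chains build the suggestions list, then trimmed[:3] joined.
def generate_followup_suggestions_py (prompt : String) (concepts : List String) (is_daw_query : Bool) : Option String :=
  let prompt_lower := PySem.Str.lower prompt
  let suggestions : List String :=
    if is_daw_query then
      if ["vocal", "singer", "voice"].any (fun term => PySem.Str.isIn term prompt_lower) then
        ["Ask for a vocal chain order (HPF → EQ → compression → de-ess → reverb send).",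
         "Check de-esser thresholds or sibilant bands if highs feel harsh.",
         "Request suggested attack/release times for your vocal style (spoken vs sung)."]
      else if ["guitar", "bass", "drum", "kick", "snare"].any (fun term => PySem.Str.isIn term prompt_lower) then
        ["Compare mic/DI blend tips for your instrument to tighten tone.",
         "Ask for frequency slots to avoid masking with vocals or synths.",
         "Request parallel processing ideas (parallel comp or saturation) for punch without losing transients."]
      else if ["reverb", "delay", "space", "ambience"].any (fun term => PySem.Str.isIn term prompt_lower) then
        ["Ask for predelay/decay starting points matched to your BPM.",
         "Check which elements should stay dry vs sent to the shared verb bus.",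
         "Try mid-side EQ on reverb returns to keep lows centered and highs airy."]
      else if ["mix", "master", "muddy", "harsh", "boomy", "mud"].any (fun term => PySem.Str.isIn term prompt_lower) then
        ["Request a 3-step cleanup checklist (HPF targets, surgical EQ, gain staging).",
         "Ask for reference track matching tips (loudness and tonal balance).",
         "Check mono-compatibility and phase if the mix collapses when summed."]
      else
        let target := match concepts with | [] => "your track" | c :: _ => c
        ["Ask for a quick signal-flow plan tailored to " ++ target ++ " (gain → EQ → compression → space).",
         "Request starter EQ bands and ratios for common sources (vocals, drums, bass).",
         "Ask for a minimal CPU chain if your session is lagging (shared sends, render heavy FX)."]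
    else
      if ["plan", "next", "follow", "what else"].any (fun term => PySem.Str.isIn term prompt_lower) then
        ["Define the goal, constraints, and success criteria so I can propose a concise plan.",
         "Ask for a decision tree to pick the next action based on your context.",
         "Request a short checklist you can execute immediately."]
      else if ["help", "stuck", "problem", "issue"].any (fun term => PySem.Str.isIn term prompt_lower) then
        ["Share the exact symptom and recent changes so I can triage quickly.",
         "Ask for the top three likely causes and how to rule each out fast.",
         "Request a minimal reproduction checklist to isolate the issue."]
      else
        let focus := match concepts with | [] => "this topic" | c :: _ => c
        ["Ask for a 3-bullet summary of " ++ focus ++ ", then a deeper dive only where you need it.",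
         "Request examples vs counter-examples to clarify the boundaries of the idea.",
         "Ask for a quick-start checklist you can try in under 5 minutes."]
  if suggestions = [] then none
  else
    let trimmed := PySem.List.slice suggestions none (some 3)
    some ("Follow-up ideas:\n- " ++ PySem.Str.join "\n- " trimmed)

-- ===== PORT B =====
-- B: a flat keyword → priority index; ALL matching priorities are collected, min() picks the winner.
def pvDawKeywords : List (String × Nat) :=
  [("vocal", 0), ("singer", 0), ("voice", 0),
   ("guitar", 1), ("bass", 1), ("drum", 1), ("kick", 1), ("snare", 1),
   ("reverb", 2), ("delay", 2), ("space", 2), ("ambience", 2),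
   ("mix", 3), ("master", 3), ("muddy", 3), ("harsh", 3), ("boomy", 3), ("mud", 3)]

def pvGeneralKeywords : List (String × Nat) :=
  [("plan", 0), ("next", 0), ("follow", 0), ("what else", 0),
   ("help", 1), ("stuck", 1), ("problem", 1), ("issue", 1)]

def pvDawTexts : List (List String) :=
  [["Ask for a vocal chain order (HPF → EQ → compression → de-ess → reverb send).",
    "Check de-esser thresholds or sibilant bands if highs feel harsh.",
    "Request suggested attack/release times for your vocal style (spoken vs sung)."],
   ["Compare mic/DI blend tips for your instrument to tighten tone.",
    "Ask for frequency slots to avoid masking with vocals or synths.",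
    "Request parallel processing ideas (parallel comp or saturation) for punch without losing transients."],
   ["Ask for predelay/decay starting points matched to your BPM.",
    "Check which elements should stay dry vs sent to the shared verb bus.",
    "Try mid-side EQ on reverb returns to keep lows centered and highs airy."],
   ["Request a 3-step cleanup checklist (HPF targets, surgical EQ, gain staging).",
    "Ask for reference track matching tips (loudness and tonal balance).",
    "Check mono-compatibility and phase if the mix collapses when summed."]]

def pvGeneralTexts : List (List String) :=
  [["Define the goal, constraints, and success criteria so I can propose a concise plan.",
    "Ask for a decision tree to pick the next action based on your context.",
    "Request a short checklist you can execute immediately."],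
   ["Share the exact symptom and recent changes so I can triage quickly.",
    "Ask for the top three likely causes and how to rule each out fast.",
    "Request a minimal reproduction checklist to isolate the issue."]]

def generate_followup_suggestions_py_alt (prompt : String) (concepts : List String) (is_daw_query : Bool) : Option String :=
  let prompt_lower := PySem.Str.lower prompt
  let keywords := if is_daw_query then pvDawKeywords else pvGeneralKeywords
  let texts := if is_daw_query then pvDawTexts else pvGeneralTexts
  -- the comprehension '[prio for term, prio in keywords if term in prompt_lower]'
  let hits : List Nat := keywords.filterMap (fun tc => if PySem.Str.isIn tc.1 prompt_lower then some tc.2 else none)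
  let lines : List String :=
    match PySem.List.min? hits (fun x => x) with  -- 'if hits: … texts[min(hits)]' (min? = none iff hits = [])
    | some m => texts.getD m []                   -- texts[m]; m is a priority from the table, always < texts.length
    | none =>
      if is_daw_query then
        let target := match concepts with | [] => "your track" | c :: _ => c
        ["Ask for a quick signal-flow plan tailored to " ++ target ++ " (gain → EQ → compression → space).",
         "Request starter EQ bands and ratios for common sources (vocals, drums, bass).",
         "Ask for a minimal CPU chain if your session is lagging (shared sends, render heavy FX)."]
      else
        let focus := match concepts with | [] => "this topic" | c :: _ => c
        ["Ask for a 3-bullet summary of " ++ focus ++ ", then a deeper dive only where you need it.",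
         "Request examples vs counter-examples to clarify the boundaries of the idea.",
         "Ask for a quick-start checklist you can try in under 5 minutes."]
  some ("Follow-up ideas:\n- " ++ PySem.Str.join "\n- " (PySem.List.slice lines none (some 3)))

-- ===== PRECONDITION & SPEC =====
def Spec_generate_followup_suggestions_py (prompt : String) (concepts : List String) (is_daw_query : Bool) (out : Option String) : Prop := out = generate_followup_suggestions_py_alt prompt concepts is_daw_query
instance (prompt : String) (concepts : List String) (is_daw_query : Bool) (out : Option String) : Decidable (Spec_generate_followup_suggestions_py prompt concepts is_daw_query out) := by unfold Spec_generate_followup_suggestions_py; infer_instance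

-- ===== CLAIM (what is proved, stated in full; the proofs are below) =====
def Claim_equal_generate_followup_suggestions_py : Prop := ∀ (prompt : String) (concepts : List String) (is_daw_query : Bool), Dom_generate_followup_suggestions_py prompt concepts is_daw_query → Spec_generate_followup_suggestions_py prompt concepts is_daw_query (generate_followup_suggestions_py prompt concepts is_daw_query)

-- ===== LEMMAS AND PROOFS =====

-- keyword groups, in priority order (pvDawKeywords/pvGeneralKeywords are their flattenings)
def pvFlat (gs : List (List String × Nat)) : List (String × Nat) :=
  gs.flatMap (fun g => g.1.map (fun t => (t, g.2)))

def pvDawGroups : List (List String × Nat) :=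
  [(["vocal", "singer", "voice"], 0),
   (["guitar", "bass", "drum", "kick", "snare"], 1),
   (["reverb", "delay", "space", "ambience"], 2),
   (["mix", "master", "muddy", "harsh", "boomy", "mud"], 3)]

def pvGeneralGroups : List (List String × Nat) :=
  [(["plan", "next", "follow", "what else"], 0),
   (["help", "stuck", "problem", "issue"], 1)]

theorem pvDawKeywords_eq : pvDawKeywords = pvFlat pvDawGroups := by rfl
theorem pvGeneralKeywords_eq : pvGeneralKeywords = pvFlat pvGeneralGroups := by rfl

-- first group whose keywords match (A's if/elif chain, abstractly)
def pvPick (gs : List (List String × Nat)) (pl : String) : Option Nat :=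
  match gs with
  | [] => none
  | g :: rest => if g.1.any (fun t => PySem.Str.isIn t pl) then some g.2 else pvPick rest pl

theorem pvFilterMap_group (ts : List String) (c : Nat) (pl : String) :
    (ts.map (fun t => (t, c))).filterMap
        (fun tc => if PySem.Str.isIn tc.1 pl then some tc.2 else none)
      = List.replicate (ts.countP (fun t => PySem.Str.isIn t pl)) c := by
  induction ts with
  | nil => rfl
  | cons t ts ih =>
    rw [List.map_cons, List.filterMap_cons, List.countP_cons]
    by_cases h : PySem.Str.isIn t pl = true
    · rw [if_pos h, ih, h]
      rfl
    · rw [if_neg h, ih, Bool.eq_false_iff.mpr h]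
      rfl

theorem pvHits_flat (gs : List (List String × Nat)) (pl : String) :
    (pvFlat gs).filterMap (fun tc => if PySem.Str.isIn tc.1 pl then some tc.2 else none)
      = gs.flatMap (fun g => List.replicate (g.1.countP (fun t => PySem.Str.isIn t pl)) g.2) := by
  induction gs with
  | nil => rfl
  | cons g gs ih =>
    rw [show pvFlat (g :: gs) = g.1.map (fun t => (t, g.2)) ++ pvFlat gs from rfl,
      List.filterMap_append, pvFilterMap_group, ih, List.flatMap_cons]

theorem pvFoldl_min_eq_self (t : List Nat) (a : Nat) (h : ∀ y ∈ t, a ≤ y) :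
    t.foldl min a = a := by
  induction t with
  | nil => rfl
  | cons x t ih =>
    rw [List.foldl_cons, Nat.min_eq_left (h x (by simp))]
    exact ih (fun y hy => h y (by simp [hy]))

theorem pvMin_hits (gs : List (List String × Nat)) (pl : String)
    (hs : gs.Pairwise (fun a b => a.2 < b.2)) :
    PySem.List.min? (gs.flatMap (fun g => List.replicate (g.1.countP (fun t => PySem.Str.isIn t pl)) g.2)) (fun x => x)
      = pvPick gs pl := by
  induction gs with
  | nil => rfl
  | cons g gs ih =>
    rcases List.pairwise_cons.mp hs with ⟨hlt, htail⟩
    by_cases hany : g.1.any (fun t => PySem.Str.isIn t pl) = true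
    · -- the group matches: its block is nonempty and every later element is ≥ g.2
      have hk : 0 < g.1.countP (fun t => PySem.Str.isIn t pl) := by
        rcases List.any_eq_true.mp hany with ⟨t, ht, hp⟩
        exact List.countP_pos_iff.mpr ⟨t, ht, hp⟩
      obtain ⟨k, hkeq⟩ : ∃ k, g.1.countP (fun t => PySem.Str.isIn t pl) = k + 1 :=
        ⟨_, (Nat.succ_pred_eq_of_pos hk).symm⟩
      have htailge : ∀ y ∈ (List.replicate k g.2 ++
          gs.flatMap (fun g' => List.replicate (g'.1.countP (fun t => PySem.Str.isIn t pl)) g'.2)),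
          g.2 ≤ y := by
        intro y hy
        rcases List.mem_append.mp hy with h1 | h2
        · rw [List.eq_of_mem_replicate h1]
        · rcases List.mem_flatMap.mp h2 with ⟨g', hg', hmem⟩
          rw [List.eq_of_mem_replicate hmem]
          exact le_of_lt (hlt g' hg')
      rw [List.flatMap_cons, hkeq, List.replicate_succ, List.cons_append,
        PySem.List.min?_id_cons, pvPick, if_pos hany, pvFoldl_min_eq_self _ _ htailge]
    · -- no match in this group: its replicate block is empty
      have hk : g.1.countP (fun t => PySem.Str.isIn t pl) = 0 := by
        rw [List.countP_eq_zero]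
        intro t ht
        exact fun hp => hany (List.any_eq_true.mpr ⟨t, ht, hp⟩)
      rw [List.flatMap_cons, hk, List.replicate_zero, List.nil_append, pvPick, if_neg hany]
      exact ih htail

theorem pvMin_daw (pl : String) :
    PySem.List.min? (pvDawGroups.flatMap (fun g => List.replicate (g.1.countP (fun t => PySem.Str.isIn t pl)) g.2)) (fun x => x)
      = pvPick pvDawGroups pl := pvMin_hits _ _ (by decide)

theorem pvMin_general (pl : String) :
    PySem.List.min? (pvGeneralGroups.flatMap (fun g => List.replicate (g.1.countP (fun t => PySem.Str.isIn t pl)) g.2)) (fun x => x)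
      = pvPick pvGeneralGroups pl := pvMin_hits _ _ (by decide)

-- ===== VERDICT (by name: the statement is the Claim_ definition above) =====
theorem generate_followup_suggestions_py_spec : Claim_equal_generate_followup_suggestions_py := by
  intro prompt concepts is_daw_query _
  unfold Spec_generate_followup_suggestions_py generate_followup_suggestions_py
    generate_followup_suggestions_py_alt
  cases is_daw_query with
  | true =>
    simp only [if_true, pvDawKeywords_eq, pvHits_flat, pvMin_daw]
    cases concepts <;> simp only [pvPick, pvDawGroups] <;> split_ifs <;> first | rfl | exact ‹False›
  | false =>
    simp only [Bool.false_eq_true, if_false, pvGeneralKeywords_eq, pvHits_flat, pvMin_general]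
    cases concepts <;> simp only [pvPick, pvGeneralGroups] <;> split_ifs <;> first | rfl | exact ‹False›
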